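-- pv_equiv track=rewrite | github.com/hanarimawi/AI-MPs | mp3-code/solve.py | genCol
-- ===== SOURCE A (Python) =====
-- def genSplits(slots, zeros):
--     if slots == 1:
--         return [[zeros]]
--     sol = []
--
--     for i in range(zeros+1):
--         x = genSplits(slots-1, zeros-i)
--         for l in x:
--             sol.append([i]+l)
--     return sol
--
-- def genCol(constraint,length):
--     base =[]
--     for i in range(len(constraint)):
--         temp = []
--         for j in range(constraint[i][0]):
--             temp.append(1)
--         if i < len(constraint)-1:
--             temp.append(0)
--         base.append(temp)
--     cols = []
--     digits= 0
--     for l in base: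
--         digits+=len(l)
--     s = genSplits(len(base)+1, length-digits)
--     for i in range(len(s)):
--         cols.append([])
--         split = s[i]
--         for j in range(len(split)):
--             cols[i] = cols[i]+ ([0]*split[j])
--             if j <len(split)-1:
--                 cols[i]+=base[j]
--     return(cols)
-- ===== SOURCE B (Python) =====
-- def genCol(constraint, length):
--     # blocks of ones with a separating zero after each but the last
--     base = [[1] * c[0] + ([0] if i < len(constraint) - 1 else [])
--             for i, c in enumerate(constraint)]
--     zeros = length - sum(len(b) for b in base)
--     k = len(base) + 1
--     # all splits of `zeros` into k nonnegative parts, lexicographic,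
--     # built bottom-up: table[m] = splits of m into s parts, s = 1 .. k
--     if k == 1:
--         splits = [[zeros]]
--     elif zeros < 0:
--         splits = []
--     else:
--         table = [[[m]] for m in range(zeros + 1)]
--         for _ in range(k - 1):
--             table = [[[i] + tail for i in range(m + 1) for tail in table[m - i]]
--                      for m in range(zeros + 1)]
--         splits = table[zeros]
--     return [[x for j, gap in enumerate(split)
--              for x in [0] * gap + (base[j] if j < len(base) else [])]
--             for split in splits]
-- ===== Notes on version B (the rewrite author's own statement) =====
-- stated objective: alternative
-- what changed: The recursive genSplits is replaced by a bottom-up dynamic-programming table (table[m] = lexicographic splits of m into s parts, iterated s = 1..k), and the index-driven base/row construction is replaced by enumerate-based comprehensions.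
import Mathlib
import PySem

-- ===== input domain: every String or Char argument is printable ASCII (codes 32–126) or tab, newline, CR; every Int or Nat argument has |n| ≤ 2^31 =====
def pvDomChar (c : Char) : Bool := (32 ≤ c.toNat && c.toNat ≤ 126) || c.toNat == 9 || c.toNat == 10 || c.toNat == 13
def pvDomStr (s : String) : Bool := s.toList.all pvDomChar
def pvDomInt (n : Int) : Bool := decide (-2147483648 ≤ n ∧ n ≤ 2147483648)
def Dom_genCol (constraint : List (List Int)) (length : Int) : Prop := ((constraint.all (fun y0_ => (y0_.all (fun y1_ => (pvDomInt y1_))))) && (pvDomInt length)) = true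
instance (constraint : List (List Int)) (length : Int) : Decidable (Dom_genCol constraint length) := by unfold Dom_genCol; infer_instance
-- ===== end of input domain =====

-- B replaces the recursive split enumeration by an iterative bottom-up table and the
-- index loops by enumerate-based comprehensions (objective: alternative, same cost).

-- ===== PORT A =====
-- genSplits(slots, zeros); genCol only ever calls it with slots = len(base)+1 ≥ 1,
-- so slots is ported as Nat (the 0 case is unreachable from genCol).
def genSplitsA : Nat → Int → List (List Int)
  | 0, _ => []
  | 1, zeros => [[zeros]]
  | s + 2, zeros =>
      (PySem.List.pyRange 0 (zeros + 1) 1).foldl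
        (fun sol i => sol ++ (genSplitsA (s + 1) (zeros - i)).map (fun l => i :: l)) []

def genCol (constraint : List (List Int)) (length : Int) : List (List Int) :=
  let base := (List.range constraint.length).map (fun (i : Nat) =>
    let temp := List.replicate (PySem.List.pyGetD (PySem.List.pyGetD constraint (i : Int) []) 0 0).toNat 1
    if (i : Int) < (constraint.length : Int) - 1 then temp ++ [0] else temp)
  let digits := base.foldl (fun d l => d + (l.length : Int)) 0
  let s := genSplitsA (base.length + 1) (length - digits)
  s.map (fun split =>
    (List.range split.length).foldl (fun (col : List Int) (j : Nat) =>
      let col := col ++ List.replicate (PySem.List.pyGetD split (j : Int) 0).toNat 0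
      if (j : Int) < (split.length : Int) - 1 then col ++ PySem.List.pyGetD base (j : Int) [] else col) [])

-- ===== PORT B =====
def dpInit (N : Nat) : List (List (List Int)) :=
  (List.range (N + 1)).map (fun (m : Nat) => [[(m : Int)]])

def dpStep (N : Nat) (table : List (List (List Int))) : List (List (List Int)) :=
  (List.range (N + 1)).map (fun (m : Nat) =>
    (List.range (m + 1)).flatMap (fun (i : Nat) => (table.getD (m - i) []).map (fun tail => (i : Int) :: tail)))

def genCol_alt (constraint : List (List Int)) (length : Int) : List (List Int) :=
  let base := (PySem.List.enumerate constraint).map (fun p =>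
    List.replicate (PySem.List.pyGetD p.2 0 0).toNat 1 ++
      (if p.1 < (constraint.length : Int) - 1 then [0] else []))
  let zeros := length - (base.map (fun b => (b.length : Int))).sum
  let k := base.length + 1
  let splits :=
    if k = 1 then [[zeros]]
    else if zeros < 0 then []
    else ((List.range (k - 1)).foldl (fun table _ => dpStep zeros.toNat table) (dpInit zeros.toNat)).getD zeros.toNat []
  splits.map (fun split =>
    (PySem.List.enumerate split).flatMap (fun p =>
      List.replicate p.2.toNat 0 ++ (if p.1 < (base.length : Int) then base.getD p.1.toNat [] else [])))

-- ===== PRECONDITION & SPEC =====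
-- Pre_ excludes constraints containing an empty inner list, on which A raises IndexError
-- at constraint[i][0] (B raises there too).
def Pre_genCol (constraint : List (List Int)) (length : Int) : Prop :=
  ∀ l ∈ constraint, l ≠ []

instance (constraint : List (List Int)) (length : Int) : Decidable (Pre_genCol constraint length) := by
  unfold Pre_genCol; infer_instance

def pvWitness_genCol : List (List Int) × Int := ([[2], [1]], 6)

def Spec_genCol (constraint : List (List Int)) (length : Int) (out : List (List Int)) : Prop := out = genCol_alt constraint length
instance (constraint : List (List Int)) (length : Int) (out : List (List Int)) : Decidable (Spec_genCol constraint length out) := by unfold Spec_genCol; infer_instance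

-- ===== CLAIM (what is proved, stated in full; the proofs are below) =====
def Claim_equal_genCol : Prop := ∀ (constraint : List (List Int)) (length : Int), Dom_genCol constraint length → Pre_genCol constraint length → Spec_genCol constraint length (genCol constraint length)

-- ===== LEMMAS AND PROOFS =====

-- the bases built by the two ports coincide
theorem base_eq (constraint : List (List Int)) :
    (PySem.List.enumerate constraint).map (fun p =>
      List.replicate (PySem.List.pyGetD p.2 0 0).toNat (1 : Int) ++
        (if p.1 < (constraint.length : Int) - 1 then [(0 : Int)] else [])) =
    (List.range constraint.length).map (fun (i : Nat) =>
      if (i : Int) < (constraint.length : Int) - 1 then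
        List.replicate (PySem.List.pyGetD (PySem.List.pyGetD constraint (i : Int) []) 0 0).toNat (1 : Int) ++ [0]
      else
        List.replicate (PySem.List.pyGetD (PySem.List.pyGetD constraint (i : Int) []) 0 0).toNat (1 : Int)) := by
  rw [PySem.List.enumerate_eq_map_pyRange constraint []]
  rw [show PySem.List.len constraint = ((constraint.length : Nat) : Int) by
        simp [PySem.List.len]]
  rw [PySem.List.pyRange_zero_natCast]
  simp only [List.map_map]
  refine List.map_congr_left ?_
  intro i _
  simp only [Function.comp]
  split_ifs <;> simp

-- the dp table after t steps holds genSplitsA (t+1)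
theorem dp_correct (t N m : Nat) (hm : m ≤ N) :
    (((dpStep N)^[t]) (dpInit N)).getD m [] = genSplitsA (t + 1) (m : Int) := by
  induction t generalizing m with
  | zero =>
    simp only [Function.iterate_zero, id, dpInit]
    rw [PySem.List.getD_map_range _ _ _ _ (by omega)]
    rfl
  | succ t ih =>
    rw [Function.iterate_succ_apply']
    generalize hX : (dpStep N)^[t] (dpInit N) = X at ih
    unfold dpStep
    rw [PySem.List.getD_map_range _ _ _ _ (by omega)]
    show _ = genSplitsA (t + 2) (m : Int)
    unfold genSplitsA
    rw [PySem.List.foldl_append_eq_flatMap, List.nil_append]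
    rw [show ((m : Int) + 1) = ((m + 1 : Nat) : Int) by push_cast; ring]
    rw [PySem.List.pyRange_zero_natCast, List.flatMap_map]
    refine List.flatMap_congr ?_
    intro i hi
    rw [List.mem_range] at hi
    rw [ih (m - i) (by omega)]
    rw [show (m : Int) - (i : Int) = ((m - i : Nat) : Int) by omega]

-- every split generated for s+1 slots has length s+1
theorem genSplitsA_length (s : Nat) (z : Int) (l : List Int) (hl : l ∈ genSplitsA (s + 1) z) :
    l.length = s + 1 := by
  induction s generalizing z l with
  | zero =>
    unfold genSplitsA at hl
    simp at hl
    simp [hl]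
  | succ s ih =>
    unfold genSplitsA at hl
    rw [PySem.List.foldl_append_eq_flatMap, List.nil_append, List.mem_flatMap] at hl
    obtain ⟨i, _, hl⟩ := hl
    rw [List.mem_map] at hl
    obtain ⟨a, ha, rfl⟩ := hl
    simp [ih _ _ ha]

theorem foldl_const_range {α : Type} (f : α → α) (x : α) (t : Nat) :
    (List.range t).foldl (fun a _ => f a) x = f^[t] x := by
  induction t with
  | zero => rfl
  | succ t ih =>
    rw [List.range_succ, List.foldl_append, ih, Function.iterate_succ_apply']
    rfl

-- the split lists of the two ports coincide
theorem splits_eq (b : Nat) (z : Int) :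
    genSplitsA (b + 1) z =
      (if b + 1 = 1 then [[z]]
       else if z < 0 then []
       else ((List.range (b + 1 - 1)).foldl (fun table _ => dpStep z.toNat table) (dpInit z.toNat)).getD z.toNat []) := by
  cases b with
  | zero => rfl
  | succ b =>
    simp only [if_neg (by omega : ¬ b + 1 + 1 = 1)]
    by_cases hz : z < 0
    · rw [if_pos hz]
      unfold genSplitsA
      rw [PySem.List.pyRange_one_eq_nil (by omega)]
      rfl
    · rw [if_neg hz]
      rw [show b + 1 + 1 - 1 = b + 1 from rfl, foldl_const_range]
      rw [dp_correct (b + 1) z.toNat z.toNat le_rfl]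
      rw [Int.toNat_of_nonneg (by omega)]

-- the row built from one split coincides between the ports, given its length
theorem row_eq (base : List (List Int)) (split : List Int) (hlen : split.length = base.length + 1) :
    (List.range split.length).foldl (fun (col : List Int) (j : Nat) =>
      if (j : Int) < (split.length : Int) - 1 then
        (col ++ List.replicate (PySem.List.pyGetD split (j : Int) 0).toNat 0) ++ PySem.List.pyGetD base (j : Int) []
      else
        col ++ List.replicate (PySem.List.pyGetD split (j : Int) 0).toNat 0) [] =
    (PySem.List.enumerate split).flatMap (fun p =>
      List.replicate p.2.toNat 0 ++ (if p.1 < (base.length : Int) then base.getD p.1.toNat [] else [])) := by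
  have hfun : (fun (col : List Int) (j : Nat) =>
      if (j : Int) < (split.length : Int) - 1 then
        (col ++ List.replicate (PySem.List.pyGetD split (j : Int) 0).toNat 0) ++ PySem.List.pyGetD base (j : Int) []
      else
        col ++ List.replicate (PySem.List.pyGetD split (j : Int) 0).toNat 0) =
      (fun (col : List Int) (j : Nat) => col ++
        (List.replicate (PySem.List.pyGetD split (j : Int) 0).toNat 0 ++
          (if (j : Int) < (split.length : Int) - 1 then PySem.List.pyGetD base (j : Int) [] else []))) := by
    funext col j
    split_ifs <;> simp
  rw [hfun, PySem.List.foldl_append_eq_flatMap, List.nil_append]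
  rw [PySem.List.enumerate_eq_map_pyRange split 0]
  rw [show PySem.List.len split = ((split.length : Nat) : Int) by simp [PySem.List.len]]
  rw [PySem.List.pyRange_zero_natCast, List.map_map, List.flatMap_map]
  refine List.flatMap_congr ?_
  intro j hj
  rw [List.mem_range] at hj
  simp only [Function.comp, PySem.List.pyGetD_natCast, Int.toNat_natCast]
  have hcond : ((j : Int) < (split.length : Int) - 1) ↔ ((j : Int) < (base.length : Int)) := by
    rw [hlen]; push_cast; omega
  by_cases h : (j : Int) < (base.length : Int)
  · rw [if_pos (hcond.mpr h), if_pos h]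
  · rw [if_neg (fun hc => h (hcond.mp hc)), if_neg h]

-- ===== VERDICT (by name: the statement is the Claim_ definition above) =====
theorem genCol_spec : Claim_equal_genCol := by
  intro constraint length _ _
  unfold Spec_genCol
  simp only [genCol, genCol_alt]
  rw [base_eq]
  rw [PySem.List.foldl_add, zero_add]
  rw [← splits_eq]
  refine List.map_congr_left ?_
  intro split hsplit
  exact row_eq _ split (genSplitsA_length _ _ split hsplit)
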